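-- pv_equiv track=rewrite | github.com/kdaniels-gg/yr3_project | Evo2_API.py | contiguous_runs
-- ===== SOURCE A (Python) =====
-- def contiguous_runs(positions):
--     """
--     Given a sorted list of integer positions, return a list of runs where each
--     run is a list of consecutive integers.
--     E.g. [3,4,7,10,11,12] -> [[3,4],[7],[10,11,12]]
--     """
--     if not positions:
--         return []
--     runs, cur = [], [positions[0]]
--     for p in positions[1:]:
--         if p == cur[-1] + 1:
--             cur.append(p)
--         else:
--             runs.append(cur)
--             cur = [p]
--     runs.append(cur)
--     return runs
-- ===== SOURCE B (Python) =====
-- def contiguous_runs(positions):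
--     """
--     Given a sorted list of integer positions, return a list of runs where each
--     run is a list of consecutive integers.
--     Tracks only the (lo, hi) bounds of each run during the scan and materializes
--     the runs as ranges at the end.
--     """
--     bounds = []
--     for p in positions:
--         if bounds and bounds[-1][1] + 1 == p:
--             bounds[-1] = (bounds[-1][0], p)
--         else:
--             bounds.append((p, p))
--     return [list(range(lo, hi + 1)) for lo, hi in bounds]
-- ===== Notes on version B (the rewrite author's own statement) =====
-- stated objective: alternative
-- what changed: B maintains only the (lo, hi) bounds of each run in a single scan (updating a pair in place) and materializes every run as list(range(lo, hi+1)) at the end, instead of A's accumulation of explicit run lists with element-by-element appends.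
import Mathlib
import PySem

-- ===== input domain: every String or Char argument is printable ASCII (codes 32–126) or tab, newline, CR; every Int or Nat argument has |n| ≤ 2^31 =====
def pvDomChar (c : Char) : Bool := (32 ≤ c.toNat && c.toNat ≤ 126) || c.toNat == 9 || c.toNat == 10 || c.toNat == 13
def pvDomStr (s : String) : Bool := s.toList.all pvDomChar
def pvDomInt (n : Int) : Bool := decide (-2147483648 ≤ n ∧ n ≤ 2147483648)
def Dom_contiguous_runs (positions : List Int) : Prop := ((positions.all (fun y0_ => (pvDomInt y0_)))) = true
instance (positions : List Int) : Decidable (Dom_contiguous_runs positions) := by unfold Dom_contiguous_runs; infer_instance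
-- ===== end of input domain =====

-- B keeps only the (lo, hi) bounds of each run during a single scan and materializes the
-- runs as integer ranges at the end, instead of A's accumulation of explicit run lists.

-- ===== PORT A =====
-- the for-loop of A over positions[1:], state (runs, cur); cur is nonempty at every call,
-- so `cur[-1]` never raises and `(pyGet? cur (-1)).getD 0` is exact.
def pvLoopA : List (List Int) → List Int → List Int → List (List Int)
  | runs, cur, [] => runs ++ [cur]
  | runs, cur, p :: rest =>
    if p = (PySem.List.pyGet? cur (-1)).getD 0 + 1 then
      pvLoopA runs (cur ++ [p]) rest
    else
      pvLoopA (runs ++ [cur]) [p] rest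

def contiguous_runs (positions : List Int) : List (List Int) :=
  if positions = [] then []
  else
    -- positions[0] is in range here, so getD 0 is exact
    pvLoopA [] [(PySem.List.pyGet? positions 0).getD 0]
      (PySem.List.slice positions (some 1) none)

-- ===== PORT B =====
-- loop body of B: `if bounds and bounds[-1][1] + 1 == p: bounds[-1] = (bounds[-1][0], p)
-- else: bounds.append((p, p))`; bounds[-1] read/write is getLast?/dropLast++.
def pvStepB (bounds : List (Int × Int)) (p : Int) : List (Int × Int) :=
  match bounds.getLast? with
  | some (lo, hi) =>
    if hi + 1 = p then bounds.dropLast ++ [(lo, p)] else bounds ++ [(p, p)]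
  | none => bounds ++ [(p, p)]

def contiguous_runs_alt (positions : List Int) : List (List Int) :=
  (positions.foldl pvStepB []).map (fun lh => PySem.List.pyRange lh.1 (lh.2 + 1) 1)

-- ===== PRECONDITION & SPEC =====
def Spec_contiguous_runs (positions : List Int) (out : List (List Int)) : Prop := out = contiguous_runs_alt positions
instance (positions : List Int) (out : List (List Int)) : Decidable (Spec_contiguous_runs positions out) := by unfold Spec_contiguous_runs; infer_instance

-- ===== CLAIM (what is proved, stated in full; the proofs are below) =====
def Claim_equal_contiguous_runs : Prop := ∀ (positions : List Int), Dom_contiguous_runs positions → Spec_contiguous_runs positions (contiguous_runs positions)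

-- ===== LEMMAS AND PROOFS =====

-- the run materialized from a bounds pair
def pvRng (b : Int × Int) : List Int := PySem.List.pyRange b.1 (b.2 + 1) 1

theorem rng_last (lo hi : Int) (h : lo ≤ hi) :
    (PySem.List.pyGet? (PySem.List.pyRange lo (hi + 1) 1) (-1)).getD 0 = hi := by
  rw [PySem.List.pyGet?_neg_one, PySem.List.pyRange_one_succ_right h]
  simp

theorem stepB_concat (bs : List (Int × Int)) (lo hi p : Int) :
    pvStepB (bs ++ [(lo, hi)]) p =
      if hi + 1 = p then bs ++ [(lo, p)] else (bs ++ [(lo, hi)]) ++ [(p, p)] := by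
  simp [pvStepB]

theorem loopA_bounds (xs : List Int) : ∀ (bs : List (Int × Int)) (lo hi : Int), lo ≤ hi →
    pvLoopA (bs.map pvRng) (PySem.List.pyRange lo (hi + 1) 1) xs
      = (List.foldl pvStepB (bs ++ [(lo, hi)]) xs).map pvRng := by
  induction xs with
  | nil =>
    intro bs lo hi _
    simp [pvLoopA, pvRng]
  | cons p rest ih =>
    intro bs lo hi hle
    simp only [pvLoopA, List.foldl_cons, rng_last lo hi hle, stepB_concat]
    by_cases hp : p = hi + 1
    · subst hp
      rw [if_pos rfl, if_pos rfl,
        ← PySem.List.pyRange_one_succ_right (show lo ≤ hi + 1 by omega),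
        ih bs lo (hi + 1) (by omega)]
    · rw [if_neg hp, if_neg (fun h => hp h.symm),
        ← PySem.List.pyRange_one_singleton p]
      have hmap : bs.map pvRng ++ [PySem.List.pyRange lo (hi + 1) 1]
          = (bs ++ [(lo, hi)]).map pvRng := by simp [pvRng]
      rw [hmap, ih (bs ++ [(lo, hi)]) p p le_rfl]

-- ===== VERDICT (by name: the statement is the Claim_ definition above) =====
theorem contiguous_runs_spec : Claim_equal_contiguous_runs := by
  intro positions _
  unfold Spec_contiguous_runs
  cases positions with
  | nil => rfl
  | cons x xs =>
    simp only [contiguous_runs, reduceCtorEq, if_false, PySem.List.pyGet?_zero_cons,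
      Option.getD_some, PySem.List.slice_from_one, List.tail_cons]
    have h0 : pvLoopA [] [x] xs
        = (List.foldl pvStepB [(x, x)] xs).map pvRng := by
      have := loopA_bounds xs [] x x le_rfl
      simpa [PySem.List.pyRange_one_singleton] using this
    rw [h0]
    rfl
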